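-- pv_equiv track=rewrite | github.com/igorvanloo/Project-Euler-Explained | Finished Problems/pe00278 - Linear Combinations of Semiprimes.py | compute
-- ===== SOURCE A (Python) =====
-- import time, math
--
-- def list_primality(n):
--     result = [True] * (n + 1)
--     result[0] = result[1] = False
--     for i in range(int(math.sqrt(n)) + 1):
--         if result[i]:
--             for j in range(2 * i, len(result), i):
--                 result[j] = False
--     return result
--
-- def list_primes(n):
--     return [i for (i, isprime) in enumerate(list_primality(n)) if isprime]
--
-- def compute(limit):
--     total = 0
--     primes = list_primes(limit)
--     for a in range(len(primes)):
--         p = primes[a]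
--         for b in range(a + 1, len(primes)):
--             q = primes[b]
--             for c in range(b + 1, len(primes)):
--                 r = primes[c]
--                 total += p*q*r*2 - p*q - p*r - q*r
--     return total
-- ===== SOURCE B (Python) =====
-- import math
--
-- def list_primality(n):
--     result = [True] * (n + 1)
--     result[0] = result[1] = False
--     for i in range(int(math.sqrt(n)) + 1):
--         if result[i]:
--             for j in range(2 * i, len(result), i):
--                 result[j] = False
--     return result
--
-- def list_primes(n):
--     return [i for (i, isprime) in enumerate(list_primality(n)) if isprime]
--
-- def compute(limit):
--     # One pass over the primes maintaining elementary symmetric sums e1,e2,e3.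
--     # Sum over triples p<q<r of (2pqr - pq - pr - qr) = 2*e3 - (n-2)*e2.
--     e1 = e2 = e3 = 0
--     n = 0
--     for p in list_primes(limit):
--         e3 += e2 * p
--         e2 += e1 * p
--         e1 += p
--         n += 1
--     return 2 * e3 - (n - 2) * e2
-- ===== Notes on version B (the rewrite author's own statement) =====
-- stated objective: faster
-- what changed: Replaced the O(n^3) triple loop over all prime triples by a single pass over the primes that maintains the elementary symmetric sums e1,e2,e3, returning 2*e3 - (n-2)*e2 in closed form.
import Mathlib
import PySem

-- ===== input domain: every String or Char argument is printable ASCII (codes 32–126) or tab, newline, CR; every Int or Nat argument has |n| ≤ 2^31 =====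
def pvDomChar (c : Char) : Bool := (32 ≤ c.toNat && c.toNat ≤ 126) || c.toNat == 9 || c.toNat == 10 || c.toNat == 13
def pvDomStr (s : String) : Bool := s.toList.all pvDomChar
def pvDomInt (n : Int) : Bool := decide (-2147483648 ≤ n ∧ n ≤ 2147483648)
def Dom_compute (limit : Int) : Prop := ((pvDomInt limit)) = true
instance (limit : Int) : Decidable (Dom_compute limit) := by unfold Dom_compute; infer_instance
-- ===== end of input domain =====

-- B replaces A's O(n^3) triple loop over primes by one pass maintaining the elementary
-- symmetric sums e1,e2,e3 (total = 2*e3 - (n-2)*e2); measurably faster.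

-- ===== PORT A =====

-- sieve helper (shared module helper of both A and B)
def listPrimality (n : Int) : List Bool :=
  -- [True]*(n+1); result[0] = result[1] = False (indices valid whenever Pre_ holds, i.e. n ≥ 1;
  -- List.set is a no-op out of range, where Python raises — those inputs are outside Pre_)
  let result := ((List.replicate (n + 1).toNat true).set 0 false).set 1 false
  -- int(math.sqrt(n)) = Int.sqrt n exactly on 0 ≤ n ≤ 2^31 (float sqrt is correctly rounded there)
  (PySem.List.pyRange 0 (Int.sqrt n + 1) 1).foldl (fun res i =>
    if PySem.List.pyGetD res i false then
      -- inner marking loop; j ≥ 0 always (range starts at 2*i with i ≥ 1 when taken), so .toNat is exact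
      (PySem.List.pyRange (2 * i) (res.length : Int) i).foldl (fun r j => r.set j.toNat false) res
    else res) result

def listPrimes (n : Int) : List Int :=
  ((PySem.List.enumerate (listPrimality n) 0).filter (fun p => p.2)).map (fun p => p.1)

def compute (limit : Int) : Int :=
  let primes := listPrimes limit
  (PySem.List.pyRange 0 (primes.length : Int) 1).foldl (fun total a =>
    let p := PySem.List.pyGetD primes a 0
    (PySem.List.pyRange (a + 1) (primes.length : Int) 1).foldl (fun total b =>
      let q := PySem.List.pyGetD primes b 0
      (PySem.List.pyRange (b + 1) (primes.length : Int) 1).foldl (fun total c =>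
        let r := PySem.List.pyGetD primes c 0
        total + (p * q * r * 2 - p * q - p * r - q * r)) total) total) 0

-- ===== PORT B =====
def compute_alt (limit : Int) : Int :=
  let s := (listPrimes limit).foldl
    (fun (s : Int × Int × Int × Int) p =>
      (s.1 + p, s.2.1 + s.1 * p, s.2.2.1 + s.2.1 * p, s.2.2.2 + 1))
    (0, 0, 0, 0)
  2 * s.2.2.1 - (s.2.2.2 - 2) * s.2.1

-- ===== PRECONDITION & SPEC =====
-- Pre_ excludes limit ≤ 0, on which A raises IndexError (result[0] on a too-short list).
def Pre_compute (limit : Int) : Prop := 1 ≤ limit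
instance (limit : Int) : Decidable (Pre_compute limit) := by unfold Pre_compute; infer_instance
def pvWitness_compute : Int := (10)

def Spec_compute (limit : Int) (out : Int) : Prop := out = compute_alt limit
instance (limit : Int) (out : Int) : Decidable (Spec_compute limit out) := by unfold Spec_compute; infer_instance

-- ===== CLAIM (what is proved, stated in full; the proofs are below) =====
def Claim_equal_compute : Prop := ∀ (limit : Int), Dom_compute limit → Pre_compute limit → Spec_compute limit (compute limit)

-- ===== LEMMAS AND PROOFS =====

-- spec-side symmetric sums (proof helpers only)
def pvE2 : List Int → Int
  | [] => 0
  | q :: u => q * u.sum + pvE2 u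

def pvE3 : List Int → Int
  | [] => 0
  | q :: u => q * pvE2 u + pvE3 u

def pvC (p q : Int) (u : List Int) : Int :=
  (u.map (fun r => p * q * r * 2 - p * q - p * r - q * r)).sum

def pvM (p : Int) : List Int → Int
  | [] => 0
  | q :: u => pvC p q u + pvM p u

def pvT : List Int → Int
  | [] => 0
  | p :: u => pvM p u + pvT u

lemma alt_fold (l : List Int) : ∀ a b c m : Int,
    l.foldl (fun (s : Int × Int × Int × Int) p =>
      (s.1 + p, s.2.1 + s.1 * p, s.2.2.1 + s.2.1 * p, s.2.2.2 + 1)) (a, b, c, m)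
    = (a + l.sum, b + a * l.sum + pvE2 l, c + b * l.sum + a * pvE2 l + pvE3 l,
       m + (l.length : Int)) := by
  induction l with
  | nil => intro a b c m; simp [pvE2, pvE3]
  | cons p t ih =>
      intro a b c m
      simp only [List.foldl_cons, ih, List.sum_cons, pvE2, pvE3, List.length_cons]
      refine Prod.ext ?_ (Prod.ext ?_ (Prod.ext ?_ ?_)) <;> simp <;> ring

lemma inner_loop (xs : List Int) (p q : Int) (b : Int) (hb : 0 ≤ b) (init : Int) :
    (PySem.List.pyRange (b + 1) (xs.length : Int) 1).foldl
      (fun tot c => tot + (p * q * (PySem.List.pyGetD xs c 0) * 2 - p * q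
        - p * (PySem.List.pyGetD xs c 0) - q * (PySem.List.pyGetD xs c 0))) init
    = init + pvC p q (xs.drop (b + 1).toNat) := by
  rw [PySem.List.foldl_pyRange_pyGetD' xs 0
      (fun tot r => tot + (p * q * r * 2 - p * q - p * r - q * r)) init (a := b + 1)
      (by omega)]
  rw [PySem.List.foldl_add]
  rfl

lemma mid_loop (xs : List Int) (p : Int) : ∀ (k : Nat) (b init : Int), 0 ≤ b →
    xs.length ≤ b.toNat + k →
    (PySem.List.pyRange b (xs.length : Int) 1).foldl
      (fun tot bi =>
        (PySem.List.pyRange (bi + 1) (xs.length : Int) 1).foldl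
          (fun t2 c => t2 + (p * (PySem.List.pyGetD xs bi 0) * (PySem.List.pyGetD xs c 0) * 2
            - p * (PySem.List.pyGetD xs bi 0)
            - p * (PySem.List.pyGetD xs c 0)
            - (PySem.List.pyGetD xs bi 0) * (PySem.List.pyGetD xs c 0))) tot) init
    = init + pvM p (xs.drop b.toNat) := by
  intro k
  induction k with
  | zero =>
      intro b init hb hlen
      rw [PySem.List.pyRange_one_eq_nil (by omega), List.drop_eq_nil_of_le (by omega)]
      simp [pvM]
  | succ k ih =>
      intro b init hb hlen
      by_cases hlt : b < (xs.length : Int)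
      · have hbn : b.toNat < xs.length := by omega
        rw [PySem.List.pyRange_one_cons hlt, List.foldl_cons,
            inner_loop xs p (PySem.List.pyGetD xs b 0) b hb init,
            ih (b + 1) _ (by omega) (by omega),
            List.drop_eq_getElem_cons hbn, pvM]
        have hget : PySem.List.pyGetD xs b 0 = xs[b.toNat] := by
          rw [PySem.List.pyGetD_of_nonneg xs 0 hb, List.getD_eq_getElem _ _ hbn]
        have ht : (b + 1).toNat = b.toNat + 1 := by omega
        rw [hget, ht]
        ring
      · rw [PySem.List.pyRange_one_eq_nil (by omega), List.drop_eq_nil_of_le (by omega)]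
        simp [pvM]

lemma outer_loop (xs : List Int) : ∀ (k : Nat) (a init : Int), 0 ≤ a →
    xs.length ≤ a.toNat + k →
    (PySem.List.pyRange a (xs.length : Int) 1).foldl
      (fun total ai =>
        (PySem.List.pyRange (ai + 1) (xs.length : Int) 1).foldl
          (fun total b =>
            (PySem.List.pyRange (b + 1) (xs.length : Int) 1).foldl
              (fun t2 c => t2 + ((PySem.List.pyGetD xs ai 0) * (PySem.List.pyGetD xs b 0)
                * (PySem.List.pyGetD xs c 0) * 2
                - (PySem.List.pyGetD xs ai 0) * (PySem.List.pyGetD xs b 0)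
                - (PySem.List.pyGetD xs ai 0) * (PySem.List.pyGetD xs c 0)
                - (PySem.List.pyGetD xs b 0) * (PySem.List.pyGetD xs c 0))) total) total) init
    = init + pvT (xs.drop a.toNat) := by
  intro k
  induction k with
  | zero =>
      intro a init ha hlen
      rw [PySem.List.pyRange_one_eq_nil (by omega), List.drop_eq_nil_of_le (by omega)]
      simp [pvT]
  | succ k ih =>
      intro a init ha hlen
      by_cases hlt : a < (xs.length : Int)
      · have han : a.toNat < xs.length := by omega
        rw [PySem.List.pyRange_one_cons hlt, List.foldl_cons,
            mid_loop xs (PySem.List.pyGetD xs a 0) k (a + 1) init (by omega) (by omega),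
            ih (a + 1) _ (by omega) (by omega),
            List.drop_eq_getElem_cons han, pvT]
        have hget : PySem.List.pyGetD xs a 0 = xs[a.toNat] := by
          rw [PySem.List.pyGetD_of_nonneg xs 0 ha, List.getD_eq_getElem _ _ han]
        have ht : (a + 1).toNat = a.toNat + 1 := by omega
        rw [hget, ht]
        ring
      · rw [PySem.List.pyRange_one_eq_nil (by omega), List.drop_eq_nil_of_le (by omega)]
        simp [pvT]

lemma pvC_eq (p q : Int) (u : List Int) :
    pvC p q u = 2 * p * q * u.sum - p * q * (u.length : Int) - p * u.sum - q * u.sum := by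
  induction u with
  | nil => simp [pvC]
  | cons r t ih =>
      simp only [pvC, List.map_cons, List.sum_cons, List.length_cons] at *
      rw [ih]; push_cast; ring

lemma pvM_eq (p : Int) (u : List Int) :
    pvM p u = 2 * p * pvE2 u - p * (((u.length : Int) - 1) * u.sum) - pvE2 u := by
  induction u with
  | nil => simp [pvM, pvE2]
  | cons q t ih =>
      simp only [pvM, pvE2, List.sum_cons, List.length_cons]
      rw [pvC_eq, ih]; push_cast; ring

lemma pvT_eq (u : List Int) :
    pvT u = 2 * pvE3 u - ((u.length : Int) - 2) * pvE2 u := by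
  induction u with
  | nil => simp [pvT, pvE2, pvE3]
  | cons p t ih =>
      simp only [pvT, pvE2, pvE3, List.length_cons]
      rw [pvM_eq, ih]; push_cast; ring

-- ===== VERDICT (by name: the statement is the Claim_ definition above) =====
theorem compute_spec : Claim_equal_compute := by
  intro limit _ _
  unfold Spec_compute compute compute_alt
  rw [alt_fold]
  rw [outer_loop (listPrimes limit) (listPrimes limit).length 0 0 le_rfl (by simp)]
  simp [pvT_eq]
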